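-- pv_equiv track=rewrite | github.com/hyeonji0609/LeetCode | 15_1657. Determine if Two Strings Are Close/Bongmin.py | closeStrings
-- ===== SOURCE A (Python) =====
-- def closeStrings(word1: str, word2: str) -> bool:
--     # 1. 길이가 안맞거나 단어들의 unique가 안 맞으면 False
--     if len(word1) != len(word2) or set(word1) != set(word2):
--         return False
--     # 2. 길이도 맞고, unique도 맞다면
--     else:
--         # 3. 유니크와 개수를 세준다
--         ############################
--         alpha_dict1 = {}
--         alpha_dict2 = {}
--         for i in word1:
--             if i not in alpha_dict1:
--                 alpha_dict1[i] = 1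
--             else:
--                 alpha_dict1[i] +=1
--         for i in word2:
--             if i not in alpha_dict2:
--                 alpha_dict2[i] = 1
--             else:
--                 alpha_dict2[i] +=1
--         ############################
--         # 4. 여기서 알파벳의 개수가 안맞으면 바꿀 수 없으므로 정렬해서 안맞다면 False
--         if sorted(list(alpha_dict1.values()))!= sorted(list(alpha_dict2.values())):
--             return False
--         # 5. 그 외의 경우의 수는 없으므로 True
--         else:
--             return True
-- ===== SOURCE B (Python) =====
-- def _rle(s):
--     # run-length encode an already-sorted list of characters
--     if not s:
--         return []
--     ch = s[0]
--     i = 1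
--     while i < len(s) and s[i] == ch:
--         i += 1
--     return [(ch, i)] + _rle(s[i:])
--
--
-- def closeStrings(word1: str, word2: str) -> bool:
--     # Sort both words and run-length encode: no dicts or sets at all.
--     runs1 = _rle(sorted(word1))
--     runs2 = _rle(sorted(word2))
--     if [c for c, _ in runs1] != [c for c, _ in runs2]:
--         return False
--     return sorted(n for _, n in runs1) == sorted(n for _, n in runs2)
-- ===== Notes on version B (the rewrite author's own statement) =====
-- stated objective: alternative
-- what changed: Replaces A's hash-based counting dicts, set comparison and length test by a sort-then-scan algorithm: sort each word, run-length-encode the sorted characters, compare the run-character lists and the sorted run-length lists; no dict or set is built.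
import Mathlib
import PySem

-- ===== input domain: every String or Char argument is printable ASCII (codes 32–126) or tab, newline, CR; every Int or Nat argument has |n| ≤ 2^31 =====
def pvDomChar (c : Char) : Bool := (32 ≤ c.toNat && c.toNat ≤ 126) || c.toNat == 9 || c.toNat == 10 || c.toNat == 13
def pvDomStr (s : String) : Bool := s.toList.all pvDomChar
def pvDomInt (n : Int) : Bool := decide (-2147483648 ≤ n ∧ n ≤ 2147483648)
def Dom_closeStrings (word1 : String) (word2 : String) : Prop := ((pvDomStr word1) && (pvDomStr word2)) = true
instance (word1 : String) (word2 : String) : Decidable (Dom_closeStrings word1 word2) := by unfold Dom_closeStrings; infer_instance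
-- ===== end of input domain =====

-- B replaces A's dict counting + set comparison by a sort-then-scan algorithm: sort each
-- word, run-length-encode it, and compare run characters and sorted run lengths.

-- ===== PORT A =====
def closeStrings (word1 : String) (word2 : String) : Bool :=
  if PySem.Str.len word1 != PySem.Str.len word2
      || !(PySem.Set.equal (PySem.Set.ofList word1.toList) (PySem.Set.ofList word2.toList)) then
    false
  else
    let alphaDict1 := word1.toList.foldl
      (fun d i => if !(d.contains i) then d.insert i 1 else d.insert i (d.getD i 0 + 1))
      (PySem.Dict.empty : PySem.Dict Char Int)
    let alphaDict2 := word2.toList.foldl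
      (fun d i => if !(d.contains i) then d.insert i 1 else d.insert i (d.getD i 0 + 1))
      (PySem.Dict.empty : PySem.Dict Char Int)
    if PySem.List.sorted alphaDict1.values (fun x => x) false
        != PySem.List.sorted alphaDict2.values (fun x => x) false then
      false
    else
      true

-- ===== PORT B =====
-- run-length encode an already-sorted list of characters (Python's _rle, recursively:
-- the while loop counting equal leading characters is takeWhile/dropWhile)
def rle (s : List Char) : List (Char × Int) :=
  match s with
  | [] => []
  | c :: rest =>
    (c, (1 : Int) + (rest.takeWhile (fun x => x == c)).length)
      :: rle (rest.dropWhile (fun x => x == c))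
termination_by s.length
decreasing_by
  have := List.length_dropWhile_le (fun x => x == c) rest
  simp only [List.length_cons]; omega

def closeStrings_alt (word1 : String) (word2 : String) : Bool :=
  let runs1 := rle (PySem.List.sorted word1.toList (fun x => x) false)
  let runs2 := rle (PySem.List.sorted word2.toList (fun x => x) false)
  if runs1.map Prod.fst != runs2.map Prod.fst then
    false
  else
    PySem.List.sorted (runs1.map Prod.snd) (fun x => x) false
      == PySem.List.sorted (runs2.map Prod.snd) (fun x => x) false

-- ===== PRECONDITION & SPEC =====
def Spec_closeStrings (word1 : String) (word2 : String) (out : Bool) : Prop := out = closeStrings_alt word1 word2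
instance (word1 : String) (word2 : String) (out : Bool) : Decidable (Spec_closeStrings word1 word2 out) := by unfold Spec_closeStrings; infer_instance

-- ===== CLAIM (what is proved, stated in full; the proofs are below) =====
def Claim_equal_closeStrings : Prop := ∀ (word1 : String) (word2 : String), Dom_closeStrings word1 word2 → Spec_closeStrings word1 word2 (closeStrings word1 word2)

-- ===== LEMMAS AND PROOFS =====

-- A's "if i not in d: d[i]=1 else d[i]+=1" loop builds the counter
lemma buildA_eq_counter (l : List Char) :
    l.foldl (fun d i => if !(d.contains i) then d.insert i 1 else d.insert i (d.getD i 0 + 1))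
      (PySem.Dict.empty : PySem.Dict Char Int) = PySem.Dict.counter l := by
  rw [← PySem.Dict.foldl_insert_getD_add_one_eq_counter]
  congr 1
  funext d i
  by_cases h : d.contains i
  · simp [h]
  · simp only [Bool.not_eq_true] at h
    simp [h, PySem.Dict.getD_of_not_contains]

lemma counter_values_eq (l : List Char) :
    (PySem.Dict.counter l).values = (PySem.Set.ofList l).map (fun k => ((l.count k : Nat) : Int)) := by
  simp [PySem.Dict.values, PySem.Dict.items_counter]

lemma sum_values_counter (l : List Char) :
    (PySem.Dict.counter l).values.sum = (l.length : Int) := by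
  have hperm : (PySem.Set.ofList l).Perm l.dedup := by
    rw [List.perm_ext_iff_of_nodup (PySem.Set.nodup_ofList l) l.nodup_dedup]
    intro a; simp [PySem.Set.mem_ofList, List.mem_dedup]
  rw [counter_values_eq, (hperm.map (fun k => ((l.count k : Nat) : Int))).sum_eq]
  have : (l.dedup.map fun x => ((l.count x : Nat) : Int)).sum
      = (((l.dedup.map fun x => l.count x).sum : Nat) : Int) := by
    induction l.dedup with
    | nil => simp
    | cons a t ih => simp [ih]
  rw [this, List.sum_map_count_dedup_eq_length]

-- dedup of a run of c's followed by a c-free tail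
lemma dedup_run (c : Char) (tw dw : List Char) (htwc : ∀ x ∈ tw, x = c) (hcdw : c ∉ dw) :
    (c :: (tw ++ dw)).dedup = c :: dw.dedup := by
  induction tw with
  | nil => simp [List.dedup_cons_of_notMem hcdw]
  | cons a t iht =>
    have hac : a = c := htwc a (by simp)
    subst hac
    rw [List.cons_append, List.dedup_cons_of_mem (by simp)]
    exact iht (fun x hx => htwc x (by simp [hx]))

-- RLE of a (≤)-sorted character list: the runs are the dedup'd characters with their counts
lemma rle_sorted_aux (n : Nat) : ∀ (s : List Char), s.length ≤ n → s.Pairwise (· ≤ ·) →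
    rle s = s.dedup.map (fun c => (c, ((s.count c : Nat) : Int))) := by
  induction n with
  | zero =>
    intro s hlen _
    have : s = [] := List.eq_nil_of_length_eq_zero (Nat.le_zero.mp hlen)
    subst this; simp [rle]
  | succ n ih =>
    intro s hlen h
    match s with
    | [] => simp [rle]
    | c :: rest =>
      rw [List.pairwise_cons] at h
      obtain ⟨hle, hrest⟩ := h
      set tw := rest.takeWhile (fun x => x == c) with htw
      set dw := rest.dropWhile (fun x => x == c) with hdw
      have hsplit : tw ++ dw = rest := List.takeWhile_append_dropWhile
      have htwc : ∀ x ∈ tw, x = c := by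
        intro x hx
        have := List.mem_takeWhile_imp hx
        simpa [beq_iff_eq] using this
      have hcdw : c ∉ dw := by
        intro hc
        rcases hd : dw with _ | ⟨d, dt⟩
        · rw [hd] at hc; simp at hc
        · have hdne : ¬ (d == c) = true := by
            have := List.head_dropWhile_not (fun x => x == c) (l := rest)
              (by rw [← hdw, hd]; simp)
            simpa [← hdw, hd] using this
          have hdne' : d ≠ c := by simpa [beq_iff_eq] using hdne
          have hdw_sub : dw.Sublist rest := List.dropWhile_sublist _
          have hcd : c ≤ d := hle d (hdw_sub.mem (by rw [hd]; simp))
          have hcd' : c < d := lt_of_le_of_ne hcd (Ne.symm hdne')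
          have hpdw : dw.Pairwise (· ≤ ·) := hrest.sublist hdw_sub
          rw [hd] at hc hpdw
          rcases List.mem_cons.mp hc with h1 | h1
          · exact hdne' h1.symm
          · have := (List.pairwise_cons.mp hpdw).1 c h1
            exact absurd (lt_of_lt_of_le hcd' this) (lt_irrefl c)
      have hcnt_tw : tw.count c = tw.length := by
        rw [List.count_eq_length]; intro x hx; rw [htwc x hx]
      have hcnt_c : (c :: rest).count c = 1 + tw.length := by
        rw [← hsplit]
        simp [List.count_append, hcnt_tw,
          List.count_eq_zero_of_not_mem hcdw]
        omega
      have hdedup : (c :: rest).dedup = c :: dw.dedup := by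
        rw [← hsplit]; exact dedup_run c tw dw htwc hcdw
      have hcount_dw : ∀ x ∈ dw, (c :: rest).count x = dw.count x := by
        intro x hx
        have hxc : x ≠ c := fun he => hcdw (he ▸ hx)
        rw [← hsplit]
        simp [List.count_append, Ne.symm hxc,
          List.count_eq_zero_of_not_mem (fun hm => hxc (htwc x hm))]
      have hpdw : dw.Pairwise (· ≤ ·) := hrest.sublist (List.dropWhile_sublist _)
      have hdwlen : dw.length ≤ n := by
        have h1 : dw.length ≤ rest.length := List.length_dropWhile_le _ _
        have h2 : rest.length ≤ n := by
          simp only [List.length_cons] at hlen; omega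
        omega
      rw [rle, ih dw hdwlen hpdw, hdedup, List.map_cons]
      congr 1
      · rw [← htw, hcnt_c]; push_cast; ring_nf
      · apply List.map_congr_left
        intro x hx
        rw [hcount_dw x (List.mem_dedup.mp hx)]

lemma rle_sorted_eq (s : List Char) (h : s.Pairwise (· ≤ ·)) :
    rle s = s.dedup.map (fun c => (c, ((s.count c : Nat) : Int))) :=
  rle_sorted_aux s.length s le_rfl h

-- dedup of a (≤)-sorted list is strictly sorted
lemma dedup_pairwise_lt (s : List Char) (h : s.Pairwise (· ≤ ·)) :
    s.dedup.Pairwise (· < ·) := by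
  have h1 : s.dedup.Pairwise (· ≤ ·) := h.sublist s.dedup_sublist
  have h2 : s.dedup.Pairwise (· ≠ ·) := s.nodup_dedup
  exact (h1.and h2).imp (fun hab => lt_of_le_of_ne hab.1 hab.2)

-- two strictly-sorted lists with the same members are equal
lemma eq_of_mem_iff_of_pairwise_lt (xs ys : List Char)
    (hx : xs.Pairwise (· < ·)) (hy : ys.Pairwise (· < ·))
    (hm : ∀ a, a ∈ xs ↔ a ∈ ys) : xs = ys := by
  have hnx : xs.Nodup := hx.imp ne_of_lt
  have hny : ys.Nodup := hy.imp ne_of_lt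
  have hperm : xs.Perm ys := (List.perm_ext_iff_of_nodup hnx hny).mpr hm
  have e1 : PySem.List.sorted ys (fun x => x) false = xs :=
    PySem.List.sorted_eq_of_perm_of_pairwise_lt _ _ _ hperm hx
  have e2 : PySem.List.sorted ys (fun x => x) false = ys :=
    PySem.List.sorted_eq_self_of_pairwise _ _ (hy.imp le_of_lt)
  rw [← e1, e2]

lemma closeStrings_eq_alt (word1 word2 : String) :
    closeStrings word1 word2 = closeStrings_alt word1 word2 := by
  unfold closeStrings closeStrings_alt
  simp only [buildA_eq_counter]
  set s1 := PySem.List.sorted word1.toList (fun x => x) false with hs1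
  set s2 := PySem.List.sorted word2.toList (fun x => x) false with hs2
  have hp1 : s1.Pairwise (· ≤ ·) := PySem.List.sorted_pairwise word1.toList (fun x => x)
  have hp2 : s2.Pairwise (· ≤ ·) := PySem.List.sorted_pairwise word2.toList (fun x => x)
  have hperm1 : s1.Perm word1.toList := PySem.List.sorted_perm word1.toList (fun x => x) false
  have hperm2 : s2.Perm word2.toList := PySem.List.sorted_perm word2.toList (fun x => x) false
  rw [rle_sorted_eq s1 hp1, rle_sorted_eq s2 hp2]
  -- run characters are the dedups; run lengths are the counts
  have hfst1 : (s1.dedup.map (fun c => (c, ((s1.count c : Nat) : Int)))).map Prod.fst = s1.dedup := by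
    simp [List.map_map, Function.comp_def]
  have hfst2 : (s2.dedup.map (fun c => (c, ((s2.count c : Nat) : Int)))).map Prod.fst = s2.dedup := by
    simp [List.map_map, Function.comp_def]
  have hsnd1 : (s1.dedup.map (fun c => (c, ((s1.count c : Nat) : Int)))).map Prod.snd
      = s1.dedup.map (fun c => ((s1.count c : Nat) : Int)) := by
    simp [List.map_map, Function.comp_def]
  have hsnd2 : (s2.dedup.map (fun c => (c, ((s2.count c : Nat) : Int)))).map Prod.snd
      = s2.dedup.map (fun c => ((s2.count c : Nat) : Int)) := by
    simp [List.map_map, Function.comp_def]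
  -- run-length multiset = counter-values multiset
  have hvperm : ∀ (l : List Char),
      ((PySem.List.sorted l (fun x => x) false).dedup.map
        (fun c => (((PySem.List.sorted l (fun x => x) false).count c : Nat) : Int))).Perm
      (PySem.Dict.counter l).values := by
    intro l
    rw [counter_values_eq]
    have hsp : (PySem.List.sorted l (fun x => x) false).Perm l :=
      PySem.List.sorted_perm l (fun x => x) false
    have hdp : (PySem.List.sorted l (fun x => x) false).dedup.Perm (PySem.Set.ofList l) := by
      rw [List.perm_ext_iff_of_nodup (List.nodup_dedup _) (PySem.Set.nodup_ofList l)]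
      intro a
      rw [List.mem_dedup, PySem.Set.mem_ofList]
      exact hsp.mem_iff
    have hthis := hdp.map (fun c => ((l.count c : Nat) : Int))
    have hmapeq : (PySem.List.sorted l (fun x => x) false).dedup.map
          (fun c => (((PySem.List.sorted l (fun x => x) false).count c : Nat) : Int))
        = (PySem.List.sorted l (fun x => x) false).dedup.map (fun c => ((l.count c : Nat) : Int)) := by
      apply List.map_congr_left; intro x _; rw [hsp.count_eq]
    rw [hmapeq]; exact hthis
  have hsortv1 : PySem.List.sorted (s1.dedup.map (fun c => ((s1.count c : Nat) : Int))) (fun x => x) false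
      = PySem.List.sorted (PySem.Dict.counter word1.toList).values (fun x => x) false :=
    PySem.List.sorted_eq_sorted_of_perm _ _ _ (fun a b h => h) (hvperm word1.toList)
  have hsortv2 : PySem.List.sorted (s2.dedup.map (fun c => ((s2.count c : Nat) : Int))) (fun x => x) false
      = PySem.List.sorted (PySem.Dict.counter word2.toList).values (fun x => x) false :=
    PySem.List.sorted_eq_sorted_of_perm _ _ _ (fun a b h => h) (hvperm word2.toList)
  -- set equality of the words ↔ equality of the dedup'd sorted characters
  have hset : PySem.Set.equal (PySem.Set.ofList word1.toList) (PySem.Set.ofList word2.toList)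
      = (s1.dedup == s2.dedup) := by
    by_cases hm : ∀ a : Char, a ∈ word1.toList ↔ a ∈ word2.toList
    · have he : s1.dedup = s2.dedup := by
        apply eq_of_mem_iff_of_pairwise_lt _ _ (dedup_pairwise_lt s1 hp1) (dedup_pairwise_lt s2 hp2)
        intro a
        rw [List.mem_dedup, List.mem_dedup, hperm1.mem_iff, hperm2.mem_iff]
        exact hm a
      rw [he]
      simp only [beq_self_eq_true]
      rw [PySem.Set.equal_iff]
      intro x
      simp only [PySem.Set.mem_ofList]
      exact hm x
    · have h1 : PySem.Set.equal (PySem.Set.ofList word1.toList) (PySem.Set.ofList word2.toList) = false := by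
        rw [Bool.eq_false_iff, Ne, PySem.Set.equal_iff]
        intro h; exact hm (fun a => by simpa [PySem.Set.mem_ofList] using h a)
      have h2 : (s1.dedup == s2.dedup) = false := by
        rw [Bool.eq_false_iff, Ne, beq_iff_eq]
        intro he
        apply hm
        intro a
        have hiff : a ∈ s1.dedup ↔ a ∈ s2.dedup := by rw [he]
        simpa [List.mem_dedup, hperm1.mem_iff, hperm2.mem_iff] using hiff
      rw [h1, h2]
  -- now a case analysis on the two conditions
  rw [hfst1, hfst2, hsnd1, hsnd2, hsortv1, hsortv2, hset]
  by_cases hd : s1.dedup = s2.dedup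
  · simp only [hd, beq_self_eq_true, Bool.not_true, Bool.or_false, bne_self_eq_false,
      Bool.false_eq_true, if_false]
    by_cases hv : PySem.List.sorted (PySem.Dict.counter word1.toList).values (fun x => x) false
        = PySem.List.sorted (PySem.Dict.counter word2.toList).values (fun x => x) false
    · have hpv : (PySem.Dict.counter word1.toList).values.Perm (PySem.Dict.counter word2.toList).values := by
        rw [← PySem.List.sorted_id_eq_sorted_id_iff_perm]; exact hv
      have hlen : word1.length = word2.length := by
        have h1 := sum_values_counter word1.toList
        have h2 := sum_values_counter word2.toList
        have hss := hpv.sum_eq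
        have e1 : word1.length = word1.toList.length := by simp
        have e2 : word2.length = word2.toList.length := by simp
        omega
      simp [hv, hlen, PySem.Str.len]
    · have : (PySem.List.sorted (PySem.Dict.counter word1.toList).values (fun x => x) false
          != PySem.List.sorted (PySem.Dict.counter word2.toList).values (fun x => x) false) = true := by
        simpa [bne_iff_ne] using hv
      simp [this, hv]
  · have hb : (s1.dedup == s2.dedup) = false := by
      rw [Bool.eq_false_iff, Ne, beq_iff_eq]; exact hd
    simp [hb, bne]

-- ===== VERDICT (by name: the statement is the Claim_ definition above) =====
theorem closeStrings_spec : Claim_equal_closeStrings := by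
  intro word1 word2 _
  unfold Spec_closeStrings
  exact closeStrings_eq_alt word1 word2
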